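-- pv_equiv track=rewrite | github.com/MoChen-bop/Course-Experiments | 2019 Autumn：information retrieval/EXP 2：word segment/code/dictionary_based/dictionary_based_segmenter.py | get_min_match_route
-- ===== SOURCE A (Python) =====
-- def get_min_match_route(DAG):
--     route = {}
--     i = 0
--     for i in range(len(DAG)):
--         if DAG[i] != []:
--             if (i + 1) in DAG[i] and DAG[i] != [i + 1]:
--                 DAG[i].remove(i + 1)
--
--             route[i] = min(DAG[i])
--         else:
--             j = i
--             while(j < len(DAG) and DAG[j] == []):
--                 j += 1
--             route[i] = j
--     return route
-- ===== SOURCE B (Python) =====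
-- def get_min_match_route(DAG):
--     # Reverse pass precomputing each position's next non-empty index,
--     # then one forward pass; DAG is never mutated.
--     n = len(DAG)
--     nxt = [n] * (n + 1)
--     for i in range(n - 1, -1, -1):
--         nxt[i] = i if DAG[i] else nxt[i + 1]
--     route = {}
--     for i, row in enumerate(DAG):
--         if row:
--             v = i + 1
--             if v in row and row != [v]:
--                 # minimum of row with one occurrence of v dropped:
--                 # the smallest element, or the second smallest if the smallest is v
--                 s = sorted(row)
--                 route[i] = s[1] if s[0] == v else s[0]
--             else:
--                 route[i] = min(row)
--         else:
--             route[i] = nxt[i]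
--     return route
-- ===== Notes on version B (the rewrite author's own statement) =====
-- stated objective: alternative
-- what changed: A rescans forward from every empty cell to find the next non-empty index (nested loop) and mutates DAG in place by removing i+1; B precomputes all next-non-empty indices in one reverse pass and, in one forward pass, reads each row's answer off its two smallest elements without mutation.
import Mathlib
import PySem

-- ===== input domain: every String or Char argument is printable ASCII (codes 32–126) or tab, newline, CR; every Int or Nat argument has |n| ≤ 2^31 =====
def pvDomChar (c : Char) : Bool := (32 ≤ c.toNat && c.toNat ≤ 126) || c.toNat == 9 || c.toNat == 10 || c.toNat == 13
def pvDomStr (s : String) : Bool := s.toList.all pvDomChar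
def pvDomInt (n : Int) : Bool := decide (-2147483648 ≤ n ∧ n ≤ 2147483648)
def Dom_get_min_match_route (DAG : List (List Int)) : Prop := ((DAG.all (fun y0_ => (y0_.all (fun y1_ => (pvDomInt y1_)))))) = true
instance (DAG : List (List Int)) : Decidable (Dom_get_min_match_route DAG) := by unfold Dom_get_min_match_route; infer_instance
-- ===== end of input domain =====

-- B replaces A's forward rescan from every empty cell by one reverse pass precomputing the
-- next non-empty index plus one forward pass; equivalence is about the RETURN value only
-- (Python A mutates DAG in place by removing i+1 from DAG[i]; B does not mutate).

set_option maxRecDepth 4096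

-- ===== PORT A =====
-- the while loop 'j = i; while j < len(DAG) and DAG[j] == []: j += 1'
def pvScanA (D : List (List Int)) (j : Int) : Int :=
  if h : j < (D.length : Int) ∧ PySem.List.pyGetD D j [] = [] then pvScanA D (j + 1)
  else j
termination_by ((D.length : Int) - j).toNat
decreasing_by omega

-- one iteration of A's 'for i in range(len(DAG))' loop; state = (DAG, route)
def pvStepA (st : List (List Int) × PySem.Dict Int Int) (i : Int) :
    List (List Int) × PySem.Dict Int Int :=
  let D := st.1
  let row := PySem.List.pyGetD D i []
  if row ≠ [] then
    -- 'DAG[i].remove(i+1)' modelled by writing back the row with i+1 removed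
    let D' := if (i + 1) ∈ row ∧ row ≠ [i + 1]
              then D.set i.toNat ((PySem.List.remove? row (i + 1)).getD [])
              else D
    (D', st.2.insert i ((PySem.List.min? (PySem.List.pyGetD D' i []) (fun x => x)).getD 0))
  else
    (D, st.2.insert i (pvScanA D i))

def get_min_match_route (DAG : List (List Int)) : List (Int × Int) :=
  (((PySem.List.pyRange 0 (DAG.length : Int) 1).foldl pvStepA (DAG, PySem.Dict.empty)).2).items

-- ===== PORT B =====
-- B's reverse loop: entry k of (pvNxtB rs i n) is nxt[i+k] for the suffix rs = DAG[i:]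
def pvNxtB : List (List Int) → Int → Int → List Int
  | [], _, n => [n]
  | r :: rs, i, n =>
    let rest := pvNxtB rs (i + 1) n
    (if r ≠ [] then i else rest.headD n) :: rest

-- B's value for a non-empty row: 's = sorted(row); s[1] if s[0] == v else s[0]'
-- (in the branch taken, row has ≥ 2 elements, so s[0]/s[1] are in range and .getD is unreachable)
def pvMinValB (i : Int) (row : List Int) : Int :=
  let v := i + 1
  if v ∈ row ∧ row ≠ [v] then
    let s := PySem.List.sorted row (fun x => x) false
    if (PySem.List.pyGet? s 0).getD 0 = v then (PySem.List.pyGet? s 1).getD 0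
    else (PySem.List.pyGet? s 0).getD 0
  else (PySem.List.min? row (fun x => x)).getD 0

def get_min_match_route_alt (DAG : List (List Int)) : List (Int × Int) :=
  let n : Int := (DAG.length : Int)
  let nxt := pvNxtB DAG 0 n
  (List.zip (PySem.List.enumerate DAG) nxt).map
    (fun p => (p.1.1, if p.1.2 ≠ [] then pvMinValB p.1.1 p.1.2 else p.2))

-- ===== PRECONDITION & SPEC =====
def Spec_get_min_match_route (DAG : List (List Int)) (out : List (Int × Int)) : Prop := out = get_min_match_route_alt DAG
instance (DAG : List (List Int)) (out : List (Int × Int)) : Decidable (Spec_get_min_match_route DAG out) := by unfold Spec_get_min_match_route; infer_instance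

-- ===== CLAIM (what is proved, stated in full; the proofs are below) =====
def Claim_equal_get_min_match_route : Prop := ∀ (DAG : List (List Int)), Dom_get_min_match_route DAG → Spec_get_min_match_route DAG (get_min_match_route DAG)

-- ===== LEMMAS AND PROOFS =====

def pvMin (xs : List Int) : Int := (PySem.List.min? xs (fun x => x)).getD 0
lemma pvMin_spec (xs : List Int) (h : xs ≠ []) : pvMin xs ∈ xs ∧ ∀ y ∈ xs, pvMin xs ≤ y := by
  obtain ⟨m, hm⟩ : ∃ m, PySem.List.min? xs (fun x => x) = some m := by
    cases hx : PySem.List.min? xs (fun x => x) with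
    | none => exact absurd ((PySem.List.min?_eq_none_iff xs (fun x => x)).mp hx) h
    | some m => exact ⟨m, rfl⟩
  have h1 := PySem.List.min?_mem hm
  have h2 := PySem.List.min?_isMin hm
  constructor
  · simpa [pvMin, hm] using h1
  · simpa [pvMin, hm] using h2
lemma pvMin_eq_of (xs ys : List Int) (hx : xs ≠ []) (hy : ys ≠ [])
    (h1 : pvMin xs ∈ ys) (h2 : pvMin ys ∈ xs) : pvMin xs = pvMin ys :=
  le_antisymm ((pvMin_spec xs hx).2 _ h2) ((pvMin_spec ys hy).2 _ h1)
lemma pvMin_perm (xs ys : List Int) (hx : xs ≠ []) (hp : xs.Perm ys) : pvMin xs = pvMin ys := by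
  have hy : ys ≠ [] := by intro h; subst h; exact hx (List.Perm.eq_nil hp)
  exact pvMin_eq_of xs ys hx hy (hp.mem_iff.mp (pvMin_spec xs hx).1)
    (hp.mem_iff.mpr (pvMin_spec ys hy).1)
lemma pvMin_cons_of_le (a : Int) (t : List Int) (h : ∀ y ∈ t, a ≤ y) : pvMin (a :: t) = a := by
  have hne : (a :: t) ≠ [] := by simp
  refine le_antisymm ((pvMin_spec _ hne).2 a (by simp)) ?_
  rcases List.mem_cons.mp (pvMin_spec _ hne).1 with hm | hm
  · omega
  · exact h _ hm

lemma pvGet0 (a b d : Int) (t : List Int) : (PySem.List.pyGet? (a :: b :: t) 0).getD d = a := by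
  rw [show ((0:Int)) = ((0:Nat):Int) from rfl, PySem.List.pyGet?_natCast]
  simp
lemma pvGet1 (a b d : Int) (t : List Int) : (PySem.List.pyGet? (a :: b :: t) 1).getD d = b := by
  rw [show ((1:Int)) = ((1:Nat):Int) from rfl, PySem.List.pyGet?_natCast]
  simp

-- A's min-after-remove equals B's sorted-two-smallest value on a nonempty row
lemma minval_eq (i : Int) (row : List Int) (hne : row ≠ []) :
    (if (i + 1) ∈ row ∧ row ≠ [i + 1]
     then pvMin ((PySem.List.remove? row (i + 1)).getD [])
     else pvMin row) = pvMinValB i row := by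
  set v := i + 1 with hv
  by_cases hc : v ∈ row ∧ row ≠ [v]
  · rw [if_pos hc]
    rw [PySem.List.remove?_eq_some_erase row v hc.1]
    simp only [Option.getD_some]
    -- row has at least 2 elements
    have hlen : 2 ≤ row.length := by
      rcases row with _ | ⟨x, _ | ⟨y, t⟩⟩
      · exact absurd rfl hne
      · have hx : v = x := by simpa using hc.1
        exact absurd (by rw [← hx]) hc.2
      · simp
    set s := PySem.List.sorted row (fun x => x) false with hs
    have hperm : s.Perm row := PySem.List.sorted_perm row (fun x => x) false
    have hlens : 2 ≤ s.length := by rw [hperm.length_eq]; exact hlen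
    have hsne : s ≠ [] := by intro h; rw [h] at hlens; simp at hlens
    obtain ⟨a, t1, h1⟩ := List.exists_cons_of_ne_nil hsne
    have ht1ne : t1 ≠ [] := by intro h; rw [h1, h] at hlens; simp at hlens
    obtain ⟨b, t, h2⟩ := List.exists_cons_of_ne_nil ht1ne
    have hst : s = a :: b :: t := by rw [h1, h2]
    have hpw : s.Pairwise (fun x y => x ≤ y) := by
      simpa using PySem.List.sorted_pairwise row (fun x => x)
    rw [hst] at hpw
    have hat : ∀ y ∈ b :: t, a ≤ y := (List.pairwise_cons.mp hpw).1
    have hbt : ∀ y ∈ t, b ≤ y := (List.pairwise_cons.mp (List.pairwise_cons.mp hpw).2).1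
    have hEperm : (row.erase v).Perm (s.erase v) := (hperm.erase v).symm
    have hEne : row.erase v ≠ [] := by
      have hl : (row.erase v).length = row.length - 1 := List.length_erase_of_mem hc.1
      intro h; rw [h] at hl; simp at hl; omega
    have hkey : pvMin (row.erase v) = pvMin (s.erase v) := pvMin_perm _ _ hEne hEperm
    rw [hst] at hkey
    unfold pvMinValB
    rw [if_pos hc, ← hv, ← hs, hst]
    simp only [pvGet0, pvGet1]
    by_cases hav : a = v
    · rw [if_pos hav, hkey, hav, List.erase_cons_head, pvMin_cons_of_le b t hbt]
    · rw [if_neg hav, hkey, List.erase_cons_tail (by simp [hav]),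
        pvMin_cons_of_le a _ (fun y hy => hat y (List.mem_of_mem_erase hy))]
  · rw [if_neg hc]
    unfold pvMinValB
    rw [if_neg (by rw [← hv]; exact hc)]
    rfl

lemma lt_of_drop_cons (D : List (List Int)) (j : Nat) (r : List Int) (rs : List (List Int))
    (h : D.drop j = r :: rs) : j < D.length := by
  by_contra hge
  rw [List.drop_eq_nil_of_le (by omega)] at h
  exact (by simp at h)

lemma pyGetD_of_drop (D : List (List Int)) (j : Nat) (r : List Int) (rs : List (List Int))
    (h : D.drop j = r :: rs) : PySem.List.pyGetD D (j : Int) [] = r := by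
  have hj : j < D.length := lt_of_drop_cons D j r rs h
  rw [PySem.List.pyGetD_natCast]
  have h0 : 0 < (D.drop j).length := by rw [h]; simp
  have hg : (D.drop j)[0]'h0 = D[j + 0]'(by omega) := List.getElem_drop
  simp [h] at hg
  simp [List.getD, List.getElem?_eq_getElem hj, hg]

lemma drop_succ_of_drop_cons (D : List (List Int)) (j : Nat) (r : List Int) (rs : List (List Int))
    (h : D.drop j = r :: rs) : D.drop (j + 1) = rs := by
  have := List.drop_drop (l := D) (i := 1) (j := j)
  rw [← this, h]
  simp

lemma pvScanA_eq_head (rs : List (List Int)) (n : Int) (j : Nat) (D : List (List Int))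
    (hn : (D.length : Int) = n) (hdrop : D.drop j = rs) (hle : (j : Int) ≤ n) :
    pvScanA D (j : Int) = (pvNxtB rs (j : Int) n).headD n := by
  induction rs generalizing j with
  | nil =>
    have hj : D.length ≤ j := by
      by_contra hlt
      have := List.drop_eq_nil_iff.mp hdrop
      omega
    have hje : (j : Int) = n := by omega
    rw [pvScanA, dif_neg (by omega)]
    simp [pvNxtB, hje]
  | cons r rs' ih =>
    have hget : PySem.List.pyGetD D (j : Int) [] = r := pyGetD_of_drop D j r rs' hdrop
    have hj : j < D.length := lt_of_drop_cons D j r rs' hdrop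
    have hdrop' : D.drop (j + 1) = rs' := drop_succ_of_drop_cons D j r rs' hdrop
    by_cases hr : r = []
    · rw [pvScanA, dif_pos ⟨by omega, by rw [hget, hr]⟩]
      have hc : ((j : Int) + 1) = ((j + 1 : Nat) : Int) := by push_cast; ring
      rw [hc, ih (j + 1) hdrop' (by omega)]
      simp [pvNxtB, hr]
    · rw [pvScanA, dif_neg (by rw [hget]; tauto)]
      simp [pvNxtB, hr]
lemma not_contains_of_keys_lt (route : PySem.Dict Int Int) (i : Int)
    (hkeys : ∀ p ∈ route.items, p.1 < i) : route.contains i = false := by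
  by_contra hc
  have : route.contains i = true := by simpa using hc
  have hmem := (PySem.Dict.contains_iff_mem_keys route i).mp this
  simp only [PySem.Dict.keys, List.mem_map] at hmem
  obtain ⟨p, hp, hpe⟩ := hmem
  have := hkeys p hp
  omega

lemma pvMain (rs : List (List Int)) (n : Int) (i : Nat) (D : List (List Int))
    (route : PySem.Dict Int Int)
    (hn : (D.length : Int) = n) (hdrop : D.drop i = rs) (hle : (i : Int) ≤ n)
    (hkeys : ∀ p ∈ route.items, p.1 < (i : Int)) :
    (((PySem.List.pyRange (i : Int) n 1).foldl pvStepA (D, route)).2).items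
      = route.items ++ (List.zip (PySem.List.enumerate rs (i : Int)) (pvNxtB rs (i : Int) n)).map
          (fun p => (p.1.1, if p.1.2 ≠ [] then pvMinValB p.1.1 p.1.2 else p.2)) := by
  induction rs generalizing i D route with
  | nil =>
    have hj : D.length ≤ i := by
      by_contra hlt
      have := List.drop_eq_nil_iff.mp hdrop
      omega
    rw [PySem.List.pyRange_one_eq_nil (by omega)]
    simp [PySem.List.enumerate]
  | cons r rs' ih =>
    have hj : i < D.length := lt_of_drop_cons D i r rs' hdrop
    have hget : PySem.List.pyGetD D (i : Int) [] = r := pyGetD_of_drop D i r rs' hdrop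
    have hdrop' : D.drop (i + 1) = rs' := drop_succ_of_drop_cons D i r rs' hdrop
    have hnc : route.contains (i : Int) = false := not_contains_of_keys_lt route _ hkeys
    have hkeys' : ∀ (m : Int) (p : Int × Int), p ∈ (route.insert (i : Int) m).items →
        p.1 < ((i + 1 : Nat) : Int) := by
      intro m p hp
      rcases (PySem.Dict.mem_items_insert route _ _ p).mp hp with h1 | h2
      · subst h1; push_cast; omega
      · have := hkeys p h2.1; push_cast; omega
    rw [PySem.List.pyRange_one_cons (by omega), List.foldl_cons]
    have hcast : ((i : Int) + 1) = ((i + 1 : Nat) : Int) := by push_cast; ring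
    have hnxt : pvNxtB (r :: rs') (i : Int) n
        = (if r ≠ [] then (i : Int) else (pvNxtB rs' ((i : Int) + 1) n).headD n)
          :: pvNxtB rs' ((i : Int) + 1) n := rfl
    by_cases hr : r = []
    · -- empty row branch
      have hstep : pvStepA (D, route) (i : Int)
          = (D, route.insert (i : Int) (pvScanA D (i : Int))) := by
        simp [pvStepA, hget, hr]
      rw [hstep, hcast, ih (i + 1) D _ hn hdrop' (by omega) (hkeys' _),
        PySem.Dict.items_insert_of_not_contains route _ hnc]
      have hscan : pvScanA D (i : Int) = (pvNxtB (r :: rs') (i : Int) n).headD n :=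
        pvScanA_eq_head (r :: rs') n i D hn hdrop (by omega)
      rw [hnxt] at hscan
      simp only [hr, ne_eq, not_true_eq_false, if_false, List.headD_cons] at hscan
      rw [hnxt, PySem.List.enumerate_cons, List.zip_cons_cons, List.map_cons]
      simp only [hr, ne_eq, not_true_eq_false, if_false, List.append_assoc, List.cons_append,
        List.nil_append, hscan, hcast]
    · -- nonempty row branch
      by_cases hcnd : ((i : Int) + 1) ∈ r ∧ r ≠ [(i : Int) + 1]
      · -- A removes i+1 from the row in place
        set r' : List Int := (PySem.List.remove? r ((i : Int) + 1)).getD [] with hr'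
        have hstep : pvStepA (D, route) (i : Int)
            = (D.set (i : Int).toNat r', route.insert (i : Int) (pvMin (PySem.List.pyGetD (D.set (i : Int).toNat r') (i : Int) []))) := by
          simp only [pvStepA, pvMin, hget]
          rw [if_pos hr, if_pos hcnd]
        have htn : ((i : Int)).toNat = i := by omega
        have hlen2 : (D.set (i : Int).toNat r').length = D.length := by simp
        have hdrop2 : (D.set (i : Int).toNat r').drop (i + 1) = rs' := by
          rw [htn, List.drop_set, if_pos (by omega)]
          exact hdrop'
        have hget2 : PySem.List.pyGetD (D.set (i : Int).toNat r') (i : Int) [] = r' := by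
          rw [htn, show ((i : Int)) = ((i : Nat) : Int) from rfl, PySem.List.pyGetD_natCast]
          simp [List.getD, hj]
        have hmin : pvMin (PySem.List.pyGetD (D.set (i : Int).toNat r') (i : Int) []) = pvMinValB (i : Int) r := by
          rw [hget2, ← minval_eq (i : Int) r hr, if_pos hcnd]
        rw [hstep, hcast, ih (i + 1) _ _ (by rw [hlen2]; exact hn) hdrop2 (by omega) (hkeys' _),
          PySem.Dict.items_insert_of_not_contains route _ hnc, hmin,
          hnxt, PySem.List.enumerate_cons, List.zip_cons_cons, List.map_cons]
        simp only [hr, ne_eq, not_false_eq_true, if_pos, List.append_assoc,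
          List.cons_append, List.nil_append, hcast]
      · have hstep : pvStepA (D, route) (i : Int)
            = (D, route.insert (i : Int) (pvMin (PySem.List.pyGetD D (i : Int) []))) := by
          simp only [pvStepA, pvMin, hget]
          rw [if_pos hr, if_neg hcnd, hget]
        have hmin : pvMin (PySem.List.pyGetD D (i : Int) []) = pvMinValB (i : Int) r := by
          rw [hget, ← minval_eq (i : Int) r hr, if_neg hcnd]
        rw [hstep, hcast, ih (i + 1) D _ hn hdrop' (by omega) (hkeys' _),
          PySem.Dict.items_insert_of_not_contains route _ hnc, hmin,
          hnxt, PySem.List.enumerate_cons, List.zip_cons_cons, List.map_cons]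
        simp only [hr, ne_eq, not_false_eq_true, if_pos, List.append_assoc,
          List.cons_append, List.nil_append, hcast]

-- ===== VERDICT (by name: the statement is the Claim_ definition above) =====
theorem get_min_match_route_spec : Claim_equal_get_min_match_route := by
  intro DAG _
  unfold Spec_get_min_match_route get_min_match_route get_min_match_route_alt
  have h := pvMain DAG (DAG.length : Int) 0 DAG PySem.Dict.empty (by simp) (by simp)
      (by positivity) (by simp [PySem.Dict.empty])
  simpa using h
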